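-- pv_equiv track=rewrite | github.com/pgorgolew/ASD-AGH-COURSE | Kolos1/Rok19.20/zad1.py | dataChange
-- ===== SOURCE A (Python) =====
-- def count(number): #zwraca liczbe wraz z iloscia jednokrotnych i wielokrotnych
--     one = 0 #ilosc jednokrotnych
--     more = 0 # ilosc wielokrotnych
--     tab = [0]*10
--     k = number
--     while k > 0:
--         digit = k%10
--         if tab[digit] == 0: one+=1
--         elif tab[digit] == 1:
--             one-=1
--             more+=1
--
--         tab[digit] += 1
--         k//=10
--
--     return (number,one,more)
--
-- def dataChange(T,n): #zwraca tablice z krotkami (liczba, ileJedn, ileWiel)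
--     tab=[0]*n
--     maxOne = maxMore = 0
--     for i in range(n):
--         tab[i]=count(T[i])
--         maxOne = max(maxOne, tab[i][1])
--         maxMore = max(maxMore, tab[i][2])
--     return (tab, maxOne, maxMore)
-- ===== SOURCE B (Python) =====
-- def dataChange(T, n):
--     res = []
--     for i in range(n):
--         x = T[i]
--         ds = []
--         k = x
--         while k > 0:
--             ds.append(k % 10)
--             k //= 10
--         one = sum(1 for d in range(10) if ds.count(d) == 1)
--         more = sum(1 for d in range(10) if ds.count(d) > 1)
--         res.append((x, one, more))
--     maxOne = max((t[1] for t in res), default=0)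
--     maxMore = max((t[2] for t in res), default=0)
--     return (res, maxOne, maxMore)
-- ===== Notes on version B (the rewrite author's own statement) =====
-- stated objective: simpler
-- what changed: Replaces A's inline single/multiple transition tracking (one/more adjusted via a 10-slot tab while extracting digits) with extracting the digit list first and then classifying digits by their final frequency (count==1 vs count>1) in a separate pass; the result list and maxima are built by comprehension/max instead of a preallocated array with running maxima.
import Mathlib
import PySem

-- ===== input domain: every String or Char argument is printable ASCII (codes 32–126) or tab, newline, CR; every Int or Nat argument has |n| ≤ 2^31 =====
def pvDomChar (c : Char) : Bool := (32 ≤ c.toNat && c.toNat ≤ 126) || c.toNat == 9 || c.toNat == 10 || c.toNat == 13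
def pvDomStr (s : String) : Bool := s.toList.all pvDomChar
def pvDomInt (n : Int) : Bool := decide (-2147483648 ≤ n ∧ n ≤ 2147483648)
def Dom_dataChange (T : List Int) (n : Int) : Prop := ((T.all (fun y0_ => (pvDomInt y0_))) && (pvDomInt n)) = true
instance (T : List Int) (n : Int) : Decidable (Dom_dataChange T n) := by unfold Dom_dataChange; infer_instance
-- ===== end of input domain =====

-- B replaces A's inline single/multiple transition tracking with digit-list extraction followed by a
-- separate classification pass (count digits occurring exactly once / more than once); same cost, simpler.

-- ===== PORT A =====
-- while k > 0: digit = k%10; update one/more from tab[digit]; tab[digit] += 1; k //= 10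
def countAuxA (k one more : Int) (tab : List Int) : Int × Int :=
  if h : 0 < k then
    let digit := PySem.Int.mod k 10
    let c := PySem.List.pyGetD tab digit 0
    let one' := if c = 0 then one + 1 else if c = 1 then one - 1 else one
    let more' := if c = 0 then more else if c = 1 then more + 1 else more
    countAuxA (PySem.Int.floordiv k 10) one' more' (PySem.List.pySetD tab digit (c + 1))
  else (one, more)
termination_by k.toNat
decreasing_by
  rw [PySem.Int.floordiv_eq_ediv_of_pos (by omega)]
  omega

def count (number : Int) : Int × Int × Int :=
  let r := countAuxA number 0 0 (List.replicate 10 0)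
  (number, r.1, r.2)

def dataChange (T : List Int) (n : Int) : (List (Int × Int × Int)) × Int × Int :=
  (PySem.List.pyRange 0 n 1).foldl
    (fun s i =>
      let t := count (PySem.List.pyGetD T i 0)
      (s.1 ++ [t], max s.2.1 t.2.1, max s.2.2 t.2.2))
    ([], 0, 0)

-- ===== PORT B =====
-- digit list of x via the same modulo loop (least-significant first)
def digitsOf (k : Int) : List Int :=
  if _h : 0 < k then PySem.Int.mod k 10 :: digitsOf (PySem.Int.floordiv k 10) else []
termination_by k.toNat
decreasing_by
  rw [PySem.Int.floordiv_eq_ediv_of_pos (by omega)]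
  omega

-- one = sum(1 for d in range(10) if ds.count(d) == 1); more likewise with > 1
def classify (x : Int) : Int × Int × Int :=
  let ds := digitsOf x
  (x, ((PySem.List.pyRange 0 10 1).countP (fun d => ds.count d == 1) : Int),
      ((PySem.List.pyRange 0 10 1).countP (fun d => decide (1 < ds.count d)) : Int))

def dataChange_alt (T : List Int) (n : Int) : (List (Int × Int × Int)) × Int × Int :=
  let res := (PySem.List.pyRange 0 n 1).map (fun i => classify (PySem.List.pyGetD T i 0))
  (res, (res.map (fun t => t.2.1)).foldl max 0, (res.map (fun t => t.2.2)).foldl max 0)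

-- ===== PRECONDITION & SPEC =====
-- Pre_ excludes n > len(T), where the Python A raises IndexError on T[i]; negative n is fine (empty result).
def Pre_dataChange (T : List Int) (n : Int) : Prop := n ≤ (T.length : Int)
instance (T : List Int) (n : Int) : Decidable (Pre_dataChange T n) := by unfold Pre_dataChange; infer_instance
def pvWitness_dataChange : List Int × Int := ([112, 5, 0], 3)

def Spec_dataChange (T : List Int) (n : Int) (out : (List (Int × Int × Int)) × Int × Int) : Prop := out = dataChange_alt T n
instance (T : List Int) (n : Int) (out : (List (Int × Int × Int)) × Int × Int) : Decidable (Spec_dataChange T n out) := by unfold Spec_dataChange; infer_instance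

-- ===== CLAIM (what is proved, stated in full; the proofs are below) =====
def Claim_equal_dataChange : Prop := ∀ (T : List Int) (n : Int), Dom_dataChange T n → Pre_dataChange T n → Spec_dataChange T n (dataChange T n)

-- ===== LEMMAS AND PROOFS =====

-- proof-side abbreviations matching classify's two counts
def cnt1 (ds : List Int) : Int := ((PySem.List.pyRange 0 10 1).countP (fun d => ds.count d == 1) : Int)
def cnt2 (ds : List Int) : Int := ((PySem.List.pyRange 0 10 1).countP (fun d => decide (1 < ds.count d)) : Int)
-- the tab list A maintains, as a function of the digits consumed so far
def tabOf (acc : List Int) : List Int := (PySem.List.pyRange 0 10 1).map (fun d => (acc.count d : Int))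

lemma classify_eq (x : Int) : classify x = (x, cnt1 (digitsOf x), cnt2 (digitsOf x)) := rfl

-- countP differs between p and q only through the single occurrence of a
lemma countP_shift (l : List Int) (p q : Int → Bool) (a : Int)
    (h : ∀ x ∈ l, x ≠ a → p x = q x) (hc : l.count a = 1) :
    (l.countP p : Int) = (l.countP q : Int) + (if p a then 1 else 0) - (if q a then 1 else 0) := by
  induction l with
  | nil => simp at hc
  | cons x t ih =>
    by_cases hxa : x = a
    · subst hxa
      have ht : t.count x = 0 := by simpa [List.count_cons] using hc
      have hmem : x ∉ t := by rwa [← List.count_eq_zero]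
      have he : t.countP p = t.countP q :=
        List.countP_congr (fun y hy => by rw [h y (List.mem_cons_of_mem _ hy) (fun e => hmem (e ▸ hy))])
      simp [List.countP_cons, he]
      split_ifs <;> omega
    · have hc' : t.count a = 1 := by simpa [List.count_cons, hxa] using hc
      have ih' := ih (fun y hy => h y (List.mem_cons_of_mem _ hy)) hc'
      have hpq : p x = q x := h x List.mem_cons_self hxa
      simp [List.countP_cons, hpq]
      split_ifs at ih' ⊢ <;> omega

lemma count_append_single (acc : List Int) (a x : Int) :
    (acc ++ [a]).count x = acc.count x + (if x = a then 1 else 0) := by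
  rcases eq_or_ne x a with h | h
  · simp [h, List.count_append]
  · simp [List.count_append, h, Ne.symm h]

lemma tabOf_nil : tabOf [] = List.replicate 10 0 := by decide

lemma get_tabOf (acc : List Int) (digit : Int) (h0 : 0 ≤ digit) (h10 : digit < 10) :
    PySem.List.pyGetD (tabOf acc) digit 0 = (acc.count digit : Int) := by
  unfold tabOf
  rw [PySem.List.pyGetD_map_pyRange_of_nonneg _ 10 _ _ h0 h10]

lemma set_tabOf (acc : List Int) (digit : Int) (h0 : 0 ≤ digit) (h10 : digit < 10) :
    PySem.List.pySetD (tabOf acc) digit ((acc.count digit : Int) + 1) = tabOf (acc ++ [digit]) := by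
  rw [PySem.List.pySetD_of_nonneg _ _ h0]
  unfold tabOf
  apply List.ext_getElem
  · simp [PySem.List.length_pyRange_one]
  · intro i hi1 hi2
    simp only [List.length_set, List.length_map, PySem.List.length_pyRange_one] at hi1 hi2
    rw [List.getElem_set]
    simp only [List.getElem_map, PySem.List.getElem_pyRange_one, zero_add]
    rw [count_append_single]
    by_cases he : digit.toNat = i
    · have hde : (i : Int) = digit := by omega
      simp [he, hde]
    · have hde : ¬ ((i : Int) = digit) := by omega
      simp [he, hde]

-- the three transition cases of A's loop, phrased on the classification counts
lemma cnt_step (acc : List Int) (digit : Int) (h0 : 0 ≤ digit) (h10 : digit < 10) :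
    cnt1 (acc ++ [digit]) =
      (if acc.count digit = 0 then cnt1 acc + 1 else if acc.count digit = 1 then cnt1 acc - 1 else cnt1 acc)
    ∧ cnt2 (acc ++ [digit]) =
      (if acc.count digit = 0 then cnt2 acc else if acc.count digit = 1 then cnt2 acc + 1 else cnt2 acc) := by
  have hmem : digit ∈ PySem.List.pyRange 0 10 1 := (PySem.List.mem_pyRange_one).2 ⟨h0, h10⟩
  have hc : (PySem.List.pyRange 0 10 1).count digit = 1 :=
    List.count_eq_one_of_mem (PySem.List.nodup_pyRange_one 0 10) hmem
  have hside : ∀ (x : Int), x ≠ digit → (acc ++ [digit]).count x = acc.count x := by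
    intro x hne; rw [count_append_single]; simp [hne]
  have hd : (acc ++ [digit]).count digit = acc.count digit + 1 := by
    rw [count_append_single]; simp
  have k1 := countP_shift (PySem.List.pyRange 0 10 1)
      (fun d => (acc ++ [digit]).count d == 1) (fun d => acc.count d == 1) digit
      (fun x _ hne => by simp [hside x hne]) hc
  have k2 := countP_shift (PySem.List.pyRange 0 10 1)
      (fun d => decide (1 < (acc ++ [digit]).count d)) (fun d => decide (1 < acc.count d)) digit
      (fun x _ hne => by simp [hside x hne]) hc
  simp only [hd] at k1 k2
  unfold cnt1 cnt2
  rcases Nat.lt_or_ge (acc.count digit) 1 with hC | hC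
  · have h' : acc.count digit = 0 := by omega
    simp only [h'] at k1 k2
    rw [if_pos (by decide), if_neg (by decide)] at k1
    rw [if_neg (by decide), if_neg (by decide)] at k2
    refine ⟨?_, ?_⟩ <;> split_ifs <;> omega
  · rcases Nat.lt_or_ge (acc.count digit) 2 with hC2 | hC2
    · have h' : acc.count digit = 1 := by
        omega
      simp only [h'] at k1 k2
      rw [if_neg (by decide), if_pos (by decide)] at k1
      rw [if_pos (by decide), if_neg (by decide)] at k2
      refine ⟨?_, ?_⟩ <;> split_ifs <;> omega
    · rw [if_neg (by simp only [beq_iff_eq]; omega), if_neg (by simp only [beq_iff_eq]; omega)] at k1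
      rw [if_pos (by simp only [decide_eq_true_eq]; omega), if_pos (by simp only [decide_eq_true_eq]; omega)] at k2
      refine ⟨?_, ?_⟩ <;> split_ifs <;> omega

-- loop invariant: A's state over the consumed digits acc computes B's classification of acc ++ remaining digits
lemma countAuxA_spec (k : Int) (acc : List Int) :
    countAuxA k (cnt1 acc) (cnt2 acc) (tabOf acc) =
      (cnt1 (acc ++ digitsOf k), cnt2 (acc ++ digitsOf k)) := by
  rw [countAuxA, digitsOf]
  by_cases h : 0 < k
  · simp only [dif_pos h]
    have h0 : 0 ≤ PySem.Int.mod k 10 := PySem.Int.mod_nonneg k (by omega)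
    have h10 : PySem.Int.mod k 10 < 10 := PySem.Int.mod_lt k (by omega)
    obtain ⟨s1, s2⟩ := cnt_step acc (PySem.Int.mod k 10) h0 h10
    rw [get_tabOf acc _ h0 h10, set_tabOf acc _ h0 h10]
    simp only [Nat.cast_eq_zero, Nat.cast_eq_one]
    rw [← s1, ← s2]
    rw [countAuxA_spec (PySem.Int.floordiv k 10) (acc ++ [PySem.Int.mod k 10])]
    simp [List.append_assoc]
  · simp only [dif_neg h]
    simp
termination_by k.toNat
decreasing_by
  rw [PySem.Int.floordiv_eq_ediv_of_pos (by omega)]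
  omega

lemma count_eq_classify (x : Int) : count x = classify x := by
  have hs := countAuxA_spec x []
  rw [tabOf_nil] at hs
  have h1 : cnt1 [] = 0 := by decide
  have h2 : cnt2 [] = 0 := by decide
  rw [h1, h2] at hs
  simp only [List.nil_append] at hs
  rw [classify_eq]
  show (x, (countAuxA x 0 0 (List.replicate 10 0)).1, (countAuxA x 0 0 (List.replicate 10 0)).2) = _
  rw [hs]

-- A's arrayed fold equals map plus two running maxima
lemma fold_build (R : List Int) (f : Int → Int × Int × Int) (t0 : List (Int × Int × Int)) (mo mm : Int) :
    R.foldl (fun s i =>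
        let t := f i
        (s.1 ++ [t], max s.2.1 t.2.1, max s.2.2 t.2.2)) (t0, mo, mm)
    = (t0 ++ R.map f, (R.map (fun i => (f i).2.1)).foldl max mo,
        (R.map (fun i => (f i).2.2)).foldl max mm) := by
  induction R generalizing t0 mo mm with
  | nil => simp
  | cons x r ih => simp [List.foldl_cons, ih]

-- ===== VERDICT (by name: the statement is the Claim_ definition above) =====
theorem dataChange_spec : Claim_equal_dataChange := by
  intro T n _ _
  unfold Spec_dataChange dataChange dataChange_alt
  rw [fold_build]
  simp only [count_eq_classify, List.map_map, Function.comp_def, List.nil_append]
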